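-- pv_equiv track=rewrite | github.com/akb0702/LIC-e-form | server.py | _close_json
-- ===== SOURCE A (Python) =====
-- def _close_json(s: str) -> str:
--     """Append missing closing braces/brackets to an unclosed JSON string."""
--     stack = []
--     in_string = False
--     escape = False
--     for ch in s:
--         if escape:
--             escape = False
--             continue
--         if ch == "\\" and in_string:
--             escape = True
--             continue
--         if ch == '"':
--             in_string = not in_string
--             continue
--         if in_string:
--             continue
--         if ch in ("{", "["):
--             stack.append("}" if ch == "{" else "]")
--         elif ch in ("}", "]"):
--             if stack and stack[-1] == ch:
--                 stack.pop()
--     return s + "".join(reversed(stack))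
-- ===== SOURCE B (Python) =====
-- def _close_json(s: str) -> str:
--     """Append missing closing braces/brackets to an unclosed JSON string."""
--     stack = []
--     i = 0
--     n = len(s)
--     while i < n:
--         ch = s[i]
--         i += 1
--         if ch == '"':
--             # consume the whole string literal
--             while i < n:
--                 c = s[i]
--                 if c == '\\':
--                     i += 2
--                 elif c == '"':
--                     i += 1
--                     break
--                 else:
--                     i += 1
--         elif ch == '{':
--             stack.append('}')
--         elif ch == '[':
--             stack.append(']')
--         elif ch == '}' or ch == ']':
--             if stack and stack[-1] == ch:
--                 stack.pop()
--     return s + ''.join(reversed(stack))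
-- ===== Notes on version B (the rewrite author's own statement) =====
-- stated objective: alternative
-- what changed: Replaces A's per-character in_string/escape flag machine by an outer scan that, on each opening quote, runs a separate inner loop consuming the whole string literal (advancing two chars on a backslash) before returning to bracket bookkeeping.
import Mathlib
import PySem

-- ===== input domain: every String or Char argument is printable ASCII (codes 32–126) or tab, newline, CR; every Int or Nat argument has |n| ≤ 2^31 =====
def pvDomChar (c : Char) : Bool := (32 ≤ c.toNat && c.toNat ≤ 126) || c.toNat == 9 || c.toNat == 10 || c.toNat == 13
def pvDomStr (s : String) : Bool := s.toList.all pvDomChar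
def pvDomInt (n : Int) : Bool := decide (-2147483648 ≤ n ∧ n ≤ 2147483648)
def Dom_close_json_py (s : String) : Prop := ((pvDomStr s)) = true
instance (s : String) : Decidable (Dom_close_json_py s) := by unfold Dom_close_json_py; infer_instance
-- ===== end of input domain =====

-- B replaces A's in_string/escape flag machine by an index-style scan whose inner loop
-- consumes each string literal whole (objective: alternative decomposition, same cost).

-- ===== PORT A =====
-- one step of A's for-loop; state = (stack, in_string, escape)
def closeStepA (st : List Char × Bool × Bool) (ch : Char) : List Char × Bool × Bool :=
  let stack := st.1
  let inS := st.2.1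
  let esc := st.2.2
  if esc then (stack, inS, false)
  else if ch = '\\' ∧ inS then (stack, inS, true)
  else if ch = '"' then (stack, !inS, false)
  else if inS then st
  else if ch = '{' ∨ ch = '[' then
    (stack ++ [if ch = '{' then '}' else ']'], inS, esc)
  else if ch = '}' ∨ ch = ']' then
    if stack ≠ [] ∧ stack.getLast? = some ch then (stack.dropLast, inS, esc) else st
  else st

def close_json_py (s : String) : String :=
  s ++ String.mk ((s.toList.foldl closeStepA ([], false, false)).1.reverse)

-- ===== PORT B =====
-- B's inner loop: consume the rest of a string literal, returning the remainder
def skipStr : List Char → List Char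
  | [] => []
  | '\\' :: rest => skipStr (rest.drop 1)   -- i += 2
  | '"' :: rest => rest                      -- i += 1; break
  | _ :: rest => skipStr rest                -- i += 1
termination_by l => l.length
decreasing_by all_goals simp

theorem skipStr_length_le (l : List Char) : (skipStr l).length ≤ l.length := by
  fun_induction skipStr l <;> simp_all <;> omega

-- B's outer loop
def closeGoB : List Char → List Char → List Char
  | [], stack => stack
  | ch :: rest, stack =>
    if ch = '"' then closeGoB (skipStr rest) stack
    else if ch = '{' then closeGoB rest (stack ++ ['}'])
    else if ch = '[' then closeGoB rest (stack ++ [']'])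
    else if ch = '}' ∨ ch = ']' then
      if stack ≠ [] ∧ stack.getLast? = some ch then closeGoB rest stack.dropLast
      else closeGoB rest stack
    else closeGoB rest stack
termination_by l => l.length
decreasing_by all_goals simp <;> exact skipStr_length_le _

def close_json_py_alt (s : String) : String :=
  s ++ String.mk ((closeGoB s.toList []).reverse)

-- ===== PRECONDITION & SPEC =====
def Spec_close_json_py (s : String) (out : String) : Prop := out = close_json_py_alt s
instance (s : String) (out : String) : Decidable (Spec_close_json_py s out) := by unfold Spec_close_json_py; infer_instance

-- ===== CLAIM (what is proved, stated in full; the proofs are below) =====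
def Claim_equal_close_json_py : Prop := ∀ (s : String), Dom_close_json_py s → Spec_close_json_py s (close_json_py s)

-- ===== LEMMAS AND PROOFS =====
-- While A is inside a string literal, its stack is untouched; after the literal ends it
-- resumes (stack, false, false) on the remainder skipStr delivers.
theorem foldA_string (l : List Char) (stack : List Char) :
    (l.foldl closeStepA (stack, true, false)).1
      = ((skipStr l).foldl closeStepA (stack, false, false)).1 := by
  fun_induction skipStr l generalizing stack with
  | case1 => simp
  | case2 rest ih =>
    match rest with
    | [] => simp [closeStepA, skipStr]
    | c :: rs =>
      simp only [List.foldl_cons, List.drop_succ_cons, List.drop_zero] at *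
      have h1 : closeStepA (stack, true, false) '\\' = (stack, true, true) := by
        simp [closeStepA]
      have h2 : closeStepA (stack, true, true) c = (stack, true, false) := by
        simp [closeStepA]
      rw [h1, h2, ih]
  | case3 rest =>
    have h : closeStepA (stack, true, false) '"' = (stack, false, false) := by
      simp [closeStepA]
    simp [h]
  | case4 c rest hne1 hne2 ih =>
    have h : closeStepA (stack, true, false) c = (stack, true, false) := by
      have h1 : ¬ c = '\\' := hne1
      have h2 : ¬ c = '"' := hne2
      simp [closeStepA, h1, h2]
    simp [h, ih]

theorem closeGoB_eq (l : List Char) (stack : List Char) :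
    closeGoB l stack = (l.foldl closeStepA (stack, false, false)).1 := by
  fun_induction closeGoB l stack with
  | case1 => simp
  | case6 =>
    rename_i ch rest stack _ _ _ _ hpop ih
    simp_all [closeStepA]
    rw [if_neg (by rintro ⟨a, b⟩; exact hpop a b)]
  | _ => simp_all [closeStepA, foldA_string]

-- ===== VERDICT (by name: the statement is the Claim_ definition above) =====
theorem close_json_py_spec : Claim_equal_close_json_py := by
  intro s _
  unfold Spec_close_json_py close_json_py close_json_py_alt
  rw [closeGoB_eq]
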